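-- pv_equiv track=rewrite | github.com/dhanus22/Pentagon | Programming/Arrays/secmax.py | secmin
-- ===== SOURCE A (Python) =====
-- def secmin(arr):
--     min = (2**31)
--     minind = -1
--     sec = (2**31)
--     secind = -1
--     for i in range(0, len(arr)):
--         if arr[i] < min:
--             sec = min
--             secind = minind
--             min = arr[i]
--             minind = i
--         elif (min != arr[i] and sec > arr[i]):
--             sec = arr[i]
--             secind = i
--     return [min, minind, sec, secind]
-- ===== SOURCE B (Python) =====
-- def secmin(arr):
--     # Two sequential scans: first find the minimum (with the 2**31 sentinel and
--     # first-occurrence index), then the smallest value distinct from it.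
--     mn = 2**31
--     minind = -1
--     for i, x in enumerate(arr):
--         if x < mn:
--             mn = x
--             minind = i
--     sec = 2**31
--     secind = -1
--     for i, x in enumerate(arr):
--         if x != mn and x < sec:
--             sec = x
--             secind = i
--     return [mn, minind, sec, secind]
-- ===== Notes on version B (the rewrite author's own statement) =====
-- stated objective: alternative
-- what changed: Replaces A's single interleaved scan that maintains (min, sec) together (demoting the old min to sec on each new minimum) by two independent sequential scans: one finds the minimum and its first index, a second finds the smallest value distinct from it.
import Mathlib
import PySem

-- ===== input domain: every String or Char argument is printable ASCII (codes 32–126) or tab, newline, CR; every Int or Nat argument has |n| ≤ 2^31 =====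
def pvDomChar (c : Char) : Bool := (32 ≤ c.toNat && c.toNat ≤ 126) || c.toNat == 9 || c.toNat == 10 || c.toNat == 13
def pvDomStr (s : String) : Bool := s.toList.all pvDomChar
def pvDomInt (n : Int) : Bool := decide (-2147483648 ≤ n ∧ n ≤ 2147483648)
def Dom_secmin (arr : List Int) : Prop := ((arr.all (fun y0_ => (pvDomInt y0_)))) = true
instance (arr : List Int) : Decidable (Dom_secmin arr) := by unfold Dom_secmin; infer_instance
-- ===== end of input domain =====

-- B replaces A's single interleaved min/second-min scan by two independent sequential
-- scans (first pass: minimum + first index; second pass: smallest value ≠ min);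
-- objective: alternative decomposition, same O(n) cost.


-- ===== PORT A =====
-- A's single loop over i in range(len(arr)) with state (min, minind, sec, secind);
-- branches in the same order as the Python.
def secminLoop : List (Int × Int) → Int × Int × Int × Int → Int × Int × Int × Int
  | [], s => s
  | (i, x) :: rest, (mn, mi, sec, si) =>
      secminLoop rest
        (if x < mn then (x, i, mn, mi)
         else if mn ≠ x ∧ sec > x then (mn, mi, x, i)
         else (mn, mi, sec, si))

def secmin (arr : List Int) : List Int :=
  let s := secminLoop (PySem.List.enumerate arr) ((2:Int)^31, -1, (2:Int)^31, -1)
  [s.1, s.2.1, s.2.2.1, s.2.2.2]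

-- ===== PORT B =====
-- B's first pass: minimum value and its first-occurrence index.
def minPass : List (Int × Int) → Int × Int → Int × Int
  | [], s => s
  | (i, x) :: rest, (mn, mi) =>
      minPass rest (if x < mn then (x, i) else (mn, mi))

-- B's second pass: smallest value distinct from mn, with its first-occurrence index.
def secPass (mn : Int) : List (Int × Int) → Int × Int → Int × Int
  | [], s => s
  | (i, x) :: rest, (sec, si) =>
      secPass mn rest (if x ≠ mn ∧ x < sec then (x, i) else (sec, si))

def secmin_alt (arr : List Int) : List Int :=
  let m := minPass (PySem.List.enumerate arr) ((2:Int)^31, -1)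
  let s := secPass m.1 (PySem.List.enumerate arr) ((2:Int)^31, -1)
  [m.1, m.2, s.1, s.2]

-- ===== PRECONDITION & SPEC =====
def Spec_secmin (arr : List Int) (out : List Int) : Prop := out = secmin_alt arr
instance (arr : List Int) (out : List Int) : Decidable (Spec_secmin arr out) := by unfold Spec_secmin; infer_instance

-- ===== CLAIM (what is proved, stated in full; the proofs are below) =====
def Claim_equal_secmin : Prop := ∀ (arr : List Int), Dom_secmin arr → Spec_secmin arr (secmin arr)

-- ===== LEMMAS AND PROOFS =====

-- The running minimum never increases.
lemma minPass_le (l : List (Int × Int)) : ∀ mn mi, (minPass l (mn, mi)).1 ≤ mn := by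
  induction l with
  | nil => intro mn mi; simp [minPass]
  | cons p rest ih =>
      rcases p with ⟨i, x⟩
      intro mn mi
      simp only [minPass]
      by_cases h : x < mn
      · simp only [h, if_pos]
        exact le_of_lt (lt_of_le_of_lt (ih x i) h)
      · simp only [h, if_neg, not_false_iff]
        exact ih mn mi

-- Decomposition of A's interleaved loop into B's two passes: the final sec-pass runs
-- with the final min; if the min changed during the loop, the sec state restarts from
-- the old (min, minind) (exactly what A's demotion on a new minimum produces).
lemma secminLoop_decompose (l : List (Int × Int)) :
    ∀ mn mi sec si,
      secminLoop l (mn, mi, sec, si) =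
        ((minPass l (mn, mi)).1, (minPass l (mn, mi)).2,
         secPass (minPass l (mn, mi)).1 l
           (if (minPass l (mn, mi)).1 = mn then (sec, si) else (mn, mi))) := by
  induction l with
  | nil =>
      intro mn mi sec si
      simp [secminLoop, minPass, secPass]
  | cons p rest ih =>
      rcases p with ⟨i, x⟩
      intro mn mi sec si
      simp only [secminLoop, minPass, secPass]
      by_cases hlt : x < mn
      · -- A takes the new-minimum branch
        simp only [hlt, if_pos]
        rw [ih x i mn mi]
        have hle : (minPass rest (x, i)).1 ≤ x := minPass_le rest x i
        have hne : (minPass rest (x, i)).1 ≠ mn := by omega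
        rw [if_neg hne]
        by_cases hfin : (minPass rest (x, i)).1 = x
        · -- x itself is the final minimum: the second pass skips x
          rw [if_pos hfin]
          split_ifs with h
          · exact absurd hfin.symm h.1
          · rfl
        · -- the minimum drops again later: the second pass records x over the old min
          rw [if_neg hfin]
          split_ifs with h
          · rfl
          · exact absurd ⟨fun e => hfin e.symm, hlt⟩ h
      · simp only [hlt, if_neg, not_false_iff]
        by_cases hsec : mn ≠ x ∧ sec > x
        · -- A takes the elif branch: mn < x < sec
          rw [if_pos hsec, ih mn mi x i]
          by_cases hfin : (minPass rest (mn, mi)).1 = mn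
          · rw [if_pos hfin, if_pos hfin]
            split_ifs with h
            · rfl
            · refine absurd ⟨?_, hsec.2⟩ h
              rw [hfin]; exact fun e => hsec.1 e.symm
          · rw [if_neg hfin, if_neg hfin]
            -- x ≥ mn, and the sec pass starts at mn, so x does not update it
            split_ifs with h
            · exact absurd h.2 hlt
            · rfl
        · -- A leaves the state unchanged
          rw [if_neg hsec, ih mn mi sec si]
          by_cases hfin : (minPass rest (mn, mi)).1 = mn
          · rw [if_pos hfin]
            split_ifs with h
            · exfalso
              refine hsec ⟨fun e => ?_, h.2⟩
              exact h.1 (by rw [hfin]; exact e.symm)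
            · rfl
          · rw [if_neg hfin]
            have hmin : (minPass rest (mn, mi)).1 ≤ mn := minPass_le rest mn mi
            split_ifs with h
            · exact absurd h.2 hlt
            · rfl

-- ===== VERDICT (by name: the statement is the Claim_ definition above) =====
theorem secmin_spec : Claim_equal_secmin := by
  intro arr _
  unfold Spec_secmin secmin secmin_alt
  rw [secminLoop_decompose]
  have : (if (minPass (PySem.List.enumerate arr) ((2:Int)^31, -1)).1 = (2:Int)^31
          then ((2:Int)^31, (-1 : Int)) else ((2:Int)^31, (-1 : Int)))
         = ((2:Int)^31, (-1 : Int)) := ite_self _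
  rw [this]
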